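-- pv_equiv track=rewrite | github.com/netblue30/firejail | contrib/sort.py | sort_protocol
-- ===== SOURCE A (Python) =====
-- def sort_protocol(original_protocols):
--     """
--     Sort the given protocols into the following order:
--
--         unix,inet,inet6,netlink,packet,bluetooth
--     """
--
--     # remove all whitespace
--     original_protocols = "".join(original_protocols.split())
--
--     # shortcut for common protocol lines
--     if original_protocols in ("unix", "unix,inet,inet6"):
--         return original_protocols
--
--     fixed_protocols = ""
--     for protocol in ("unix", "inet", "inet6", "netlink", "packet", "bluetooth"):
--         for prefix in ("", "-", "+", "="):
--             if f",{prefix}{protocol}," in f",{original_protocols},":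
--                 fixed_protocols += f"{prefix}{protocol},"
--     return fixed_protocols[:-1]
-- ===== SOURCE B (Python) =====
-- def sort_protocol(original_protocols):
--     """
--     Sort the given protocols into the canonical order
--     unix,inet,inet6,netlink,packet,bluetooth (prefixes -,+,= kept, '' first),
--     dropping unknown tokens and duplicates.
--     """
--     protocols = ("unix", "inet", "inet6", "netlink", "packet", "bluetooth")
--     prefixes = ("", "-", "+", "=")
--     rank = {p + q: i * 4 + j
--             for i, q in enumerate(protocols)
--             for j, p in enumerate(prefixes)}
--     s = "".join(original_protocols.split())
--     keys = sorted({rank[tok] for tok in s.split(",") if tok in rank})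
--     return ",".join(prefixes[k % 4] + protocols[k // 4] for k in keys)
-- ===== Notes on version B (the rewrite author's own statement) =====
-- stated objective: alternative
-- what changed: A tests all 24 canonical prefix+protocol combinations for substring membership in the comma-wrapped input; B instead walks the input's own tokens once, maps each valid token to a small integer rank via a dict built from the canonical tuples, and sorts the distinct ranks back into tokens.
import Mathlib
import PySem

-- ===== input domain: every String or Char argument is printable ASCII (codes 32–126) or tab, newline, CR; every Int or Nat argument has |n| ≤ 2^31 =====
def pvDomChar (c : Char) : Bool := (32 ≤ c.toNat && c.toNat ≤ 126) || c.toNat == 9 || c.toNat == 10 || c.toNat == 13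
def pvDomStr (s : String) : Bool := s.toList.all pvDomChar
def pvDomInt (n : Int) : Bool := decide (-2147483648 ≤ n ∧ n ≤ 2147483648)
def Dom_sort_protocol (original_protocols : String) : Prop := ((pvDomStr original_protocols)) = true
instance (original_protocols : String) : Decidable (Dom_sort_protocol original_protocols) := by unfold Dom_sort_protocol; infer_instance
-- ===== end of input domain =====

-- B replaces A's scan over all 24 prefix+protocol combinations (a substring test each) by one
-- pass over the input's own tokens, mapping each valid token to a small integer rank and sorting
-- the distinct ranks (objective: alternative).

-- ===== PORT A =====
def pvProtocolsA : List (List Char) :=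
  ["unix".toList, "inet".toList, "inet6".toList, "netlink".toList, "packet".toList, "bluetooth".toList]
def pvPrefixesA : List (List Char) := [[], ['-'], ['+'], ['=']]

-- the fixed_protocols accumulation loop of A
def pvFixedA (s : List Char) : List Char :=
  pvProtocolsA.foldl (fun acc protocol =>
    pvPrefixesA.foldl (fun acc pre =>
      if PySem.Chars.isIn ([','] ++ pre ++ protocol ++ [',']) ([','] ++ s ++ [',']) then
        acc ++ pre ++ protocol ++ [',']
      else acc) acc) []

-- A's body after the whitespace removal (s = the whitespace-free input)
def pvAMain (s : List Char) : String :=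
  -- shortcut for common protocol lines
  if s = "unix".toList ∨ s = "unix,inet,inet6".toList then String.ofList s
  else String.ofList (PySem.Chars.slice (pvFixedA s) none (some (-1)))

def sort_protocol (original_protocols : String) : String :=
  -- original_protocols = "".join(original_protocols.split())
  pvAMain (PySem.Chars.join [] (PySem.Chars.split₀ original_protocols.toList))

-- ===== PORT B =====
def pvProtocolsB : List (List Char) :=
  ["unix".toList, "inet".toList, "inet6".toList, "netlink".toList, "packet".toList, "bluetooth".toList]
def pvPrefixesB : List (List Char) := [[], ['-'], ['+'], ['=']]

-- rank = {p + q: i * 4 + j for i, q in enumerate(protocols) for j, p in enumerate(prefixes)}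
def pvRankB : PySem.Dict (List Char) Int :=
  (PySem.List.enumerate pvProtocolsB).foldl (fun d iq =>
    (PySem.List.enumerate pvPrefixesB).foldl (fun d jp =>
      d.insert (jp.2 ++ iq.2) (iq.1 * 4 + jp.1)) d) PySem.Dict.empty

-- {rank[tok] for tok in s.split(",") if tok in rank}
def pvKeys0B (s : List Char) : PySem.Set Int :=
  (PySem.Chars.splitOn s [',']).foldl (fun a tok =>
    if pvRankB.contains tok then PySem.Set.add a (pvRankB.getD tok 0) else a) PySem.Set.empty

-- B's body after the whitespace removal: sort the distinct ranks, map each back to its token.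
-- prefixes[k % 4] / protocols[k // 4] never go out of range for a rank k, so `.getD []` on
-- PySem.List.pyGet? is exact here
def pvBMain (s : List Char) : String :=
  String.ofList (PySem.Chars.join [','] ((PySem.List.sorted (pvKeys0B s) (fun k => k)).map (fun k =>
    ((PySem.List.pyGet? pvPrefixesB (PySem.Int.mod k 4)).getD []) ++
    ((PySem.List.pyGet? pvProtocolsB (PySem.Int.floordiv k 4)).getD []))))

def sort_protocol_alt (original_protocols : String) : String :=
  pvBMain (PySem.Chars.join [] (PySem.Chars.split₀ original_protocols.toList))

-- ===== PRECONDITION & SPEC =====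
def Spec_sort_protocol (original_protocols : String) (out : String) : Prop := out = sort_protocol_alt original_protocols
instance (original_protocols : String) (out : String) : Decidable (Spec_sort_protocol original_protocols out) := by unfold Spec_sort_protocol; infer_instance

-- ===== CLAIM (what is proved, stated in full; the proofs are below) =====
def Claim_equal_sort_protocol : Prop := ∀ (original_protocols : String), Dom_sort_protocol original_protocols → Spec_sort_protocol original_protocols (sort_protocol original_protocols)

-- ===== LEMMAS AND PROOFS =====

-- (first field, remaining fields) of s.split(",")
def pvSplit1 : List Char → List Char × List (List Char)
  | [] => ([], [])
  | c :: s =>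
    let p := pvSplit1 s
    if c = ',' then ([], p.1 :: p.2) else (c :: p.1, p.2)

-- token of rank k (k = 4 * protocol-index + prefix-index), B's back-translation
def pvTok (k : Int) : List Char :=
  ((PySem.List.pyGet? pvPrefixesB (PySem.Int.mod k 4)).getD []) ++
  ((PySem.List.pyGet? pvProtocolsB (PySem.Int.floordiv k 4)).getD [])
def pvKeys24 : List Int := [0,1,2,3,4,5,6,7,8,9,10,11,12,13,14,15,16,17,18,19,20,21,22,23]
-- A's substring test, as a predicate on the token
def pvCond (s t : List Char) : Bool :=
  PySem.Chars.isIn ([','] ++ t ++ [',']) ([','] ++ s ++ [','])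

lemma pvGo_eq (fuel : Nat) : ∀ (l cur : List Char) (acc : List (List Char)), l.length < fuel →
    PySem.Chars.splitOn.go [','] fuel l cur acc
      = acc.reverse ++ (cur.reverse ++ (pvSplit1 l).1) :: (pvSplit1 l).2 := by
  induction fuel with
  | zero => intro l cur acc h; omega
  | succ fuel ih =>
    intro l cur acc h
    cases l with
    | nil => simp [PySem.Chars.splitOn.go, pvSplit1]
    | cons c rest =>
      by_cases hc : c = ','
      · subst hc
        rw [PySem.Chars.splitOn.go]
        simp only [List.isPrefixOf, BEq.rfl, Bool.true_and,
          if_pos, List.length_cons, List.length_nil, List.drop_succ_cons, List.drop_zero]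
        rw [ih rest [] ((List.reverse cur) :: acc) (by simpa using Nat.lt_of_succ_lt_succ h)]
        simp [pvSplit1]
      · rw [PySem.Chars.splitOn.go]
        have hpre : List.isPrefixOf [','] (c :: rest) = false := by
          simp [List.isPrefixOf]
          exact fun h' => absurd h'.symm hc
        rw [hpre]
        simp only [Bool.false_eq_true, if_false]
        rw [ih rest (c :: cur) acc (by simpa using Nat.lt_of_succ_lt_succ h)]
        simp [pvSplit1, hc]

lemma pvSplitOn_eq (s : List Char) :
    PySem.Chars.splitOn s [','] = (pvSplit1 s).1 :: (pvSplit1 s).2 := by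
  unfold PySem.Chars.splitOn
  rw [pvGo_eq (s.length + 1) s [] [] (by omega)]
  simp

lemma pvPrefix_iff (t : List Char) : ∀ (s : List Char), ',' ∉ t →
    (((t ++ [',']) <+: (s ++ [','])) ↔ t = (pvSplit1 s).1) := by
  induction t with
  | nil =>
    intro s _
    cases s with
    | nil => simp [pvSplit1]
    | cons c s' =>
      by_cases hc : c = ','
      · subst hc; simp [pvSplit1, List.cons_prefix_cons]
      · simp [pvSplit1, hc, List.cons_prefix_cons]
        intro h'; exact absurd h'.symm hc
  | cons a t' ih =>
    intro s h
    have ha : a ≠ ',' := fun h' => h (h' ▸ List.mem_cons_self)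
    have ht' : ',' ∉ t' := fun h' => h (List.mem_cons_of_mem _ h')
    cases s with
    | nil =>
      simp only [List.nil_append, List.cons_append, List.cons_prefix_cons, pvSplit1]
      constructor
      · rintro ⟨rfl, -⟩; exact absurd rfl ha
      · intro h'; cases h'
    | cons c s' =>
      by_cases hc : c = ','
      · subst hc
        simp only [List.cons_append, List.cons_prefix_cons, pvSplit1]
        constructor
        · rintro ⟨rfl, -⟩; exact absurd rfl ha
        · intro h'; simp at h'
      · simp only [List.cons_append, List.cons_prefix_cons, pvSplit1, hc]
        rw [ih s' ht']
        simp

lemma pvInfix_tail_iff (s : List Char) : ∀ (t : List Char), t ≠ [] → ',' ∉ t →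
    (((',' :: (t ++ [','])) <:+: (s ++ [','])) ↔ t ∈ (pvSplit1 s).2) := by
  induction s with
  | nil =>
    intro t ht hc'
    simp only [List.nil_append, pvSplit1]
    constructor
    · intro h
      have := h.length_le
      simp [List.length_append] at this
    · intro h; simp at h
  | cons c s' ih =>
    intro t ht hc'
    rw [List.cons_append, List.infix_cons_iff]
    by_cases hc : c = ','
    · subst hc
      rw [ih t ht hc']
      simp only [List.cons_prefix_cons, true_and]
      rw [pvPrefix_iff t s' hc']
      simp [pvSplit1]
    · rw [ih t ht hc']
      simp only [pvSplit1, hc]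
      constructor
      · rintro (h | h)
        · rw [List.cons_prefix_cons] at h
          exact absurd h.1.symm hc
        · exact h
      · exact Or.inr

lemma pvIsIn_iff (s t : List Char) (h1 : t ≠ []) (h2 : ',' ∉ t) :
    ((pvCond s t = true) ↔ t ∈ (pvSplit1 s).1 :: (pvSplit1 s).2) := by
  rw [pvCond, PySem.Chars.isIn_iff_infix]
  show ((',' :: (t ++ [','])) <:+: (',' :: (s ++ [',']))) ↔ _
  rw [List.infix_cons_iff, List.cons_prefix_cons, pvPrefix_iff t s h2,
    pvInfix_tail_iff s t h1 h2]
  simp [List.mem_cons]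

lemma pvSet_mem (fields : List (List Char)) : ∀ (a : PySem.Set Int) (k : Int),
    (k ∈ fields.foldl (fun a tok =>
        if pvRankB.contains tok then PySem.Set.add a (pvRankB.getD tok 0) else a) a)
      ↔ k ∈ a ∨ ∃ tok ∈ fields, pvRankB.contains tok = true ∧ pvRankB.getD tok 0 = k := by
  induction fields with
  | nil => simp
  | cons tok fs ih =>
    intro a k
    simp only [List.foldl_cons]
    by_cases h : pvRankB.contains tok = true
    · rw [if_pos h, ih]
      simp only [PySem.Set.mem_add, List.mem_cons]
      constructor
      · rintro ((hk | hk) | ⟨u, hu, hu1, hu2⟩)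
        · exact Or.inl hk
        · exact Or.inr ⟨tok, Or.inl rfl, h, hk.symm⟩
        · exact Or.inr ⟨u, Or.inr hu, hu1, hu2⟩
      · rintro (hk | ⟨u, (rfl | hu), hu1, hu2⟩)
        · exact Or.inl (Or.inl hk)
        · exact Or.inl (Or.inr hu2.symm)
        · exact Or.inr ⟨u, hu, hu1, hu2⟩
    · rw [if_neg h, ih]
      simp only [List.mem_cons]
      constructor
      · rintro (hk | ⟨u, hu, hu1, hu2⟩)
        · exact Or.inl hk
        · exact Or.inr ⟨u, Or.inr hu, hu1, hu2⟩
      · rintro (hk | ⟨u, (rfl | hu), hu1, hu2⟩)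
        · exact Or.inl hk
        · exact absurd hu1 h
        · exact Or.inr ⟨u, hu, hu1, hu2⟩

lemma pvSet_nodup (fields : List (List Char)) : ∀ (a : PySem.Set Int), a.Nodup →
    (fields.foldl (fun a tok =>
        if pvRankB.contains tok then PySem.Set.add a (pvRankB.getD tok 0) else a) a).Nodup := by
  induction fields with
  | nil => intro a h; exact h
  | cons tok fs ih =>
    intro a h
    simp only [List.foldl_cons]
    by_cases hc : pvRankB.contains tok = true
    · rw [if_pos hc]; exact ih _ (PySem.Set.nodup_add a _ h)
    · rw [if_neg hc]; exact ih a h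

lemma pvFoldGen (C : List Char → Bool) (g : List Char → List Char) (l : List (List Char)) :
    ∀ (acc : List Char),
    l.foldl (fun acc t => if C t then acc ++ g t else acc) acc = acc ++ (l.filter C).flatMap g := by
  induction l with
  | nil => simp
  | cons t l ih =>
    intro acc
    simp only [List.foldl_cons, List.filter_cons]
    by_cases h : C t = true
    · rw [if_pos h, if_pos h, ih, List.flatMap_cons, List.append_assoc]
    · rw [if_neg h, if_neg h, ih]

lemma pvJoin_cons_cons (f g : List Char) (r : List (List Char)) :
    PySem.Chars.join [','] (f :: g :: r) = f ++ [','] ++ PySem.Chars.join [','] (g :: r) := by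
  simp [PySem.Chars.join, List.intercalate, List.intersperse]

lemma pvFlatMap_comma (L : List (List Char)) :
    (L.flatMap (fun t => t ++ [','])).dropLast = PySem.Chars.join [','] L := by
  induction L with
  | nil => simp [PySem.Chars.join, List.intercalate]
  | cons f r ih =>
    cases r with
    | nil => simp [PySem.Chars.join, List.intercalate]
    | cons g r' =>
      have hne : (g :: r').flatMap (fun t => t ++ [',']) ≠ [] := by
        simp [List.flatMap_cons]
      rw [List.flatMap_cons, pvJoin_cons_cons, ← ih, List.dropLast_append_of_ne_nil hne]

-- closed facts about the literal rank table (all by computation)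
lemma pvRank_keys : pvRankB.keys = pvKeys24.map pvTok := by decide
lemma pvRank_getD : ∀ k ∈ pvKeys24,
    pvRankB.contains (pvTok k) = true ∧ pvRankB.getD (pvTok k) 0 = k := by decide
lemma pvTok_good : ∀ k ∈ pvKeys24, pvTok k ≠ [] ∧ ',' ∉ pvTok k := by decide
lemma pvCanon_eq :
    pvProtocolsA.flatMap (fun q => pvPrefixesA.map (· ++ q)) = pvKeys24.map pvTok := by decide
lemma pvKeys24_lt : pvKeys24.Pairwise (· < ·) := by decide
lemma pvKeys24_nodup : pvKeys24.Nodup := by decide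

lemma pvRank_mem_getD : ∀ (tok : List Char), pvRankB.contains tok = true →
    ∃ j ∈ pvKeys24, tok = pvTok j ∧ pvRankB.getD tok 0 = j := by
  intro tok h
  rw [PySem.Dict.contains_iff_mem_keys, pvRank_keys, List.mem_map] at h
  obtain ⟨j, hj, rfl⟩ := h
  exact ⟨j, hj, rfl, (pvRank_getD j hj).2⟩

lemma pvFixedA_eq (s : List Char) :
    pvFixedA s = ((pvKeys24.map pvTok).filter (pvCond s)).flatMap (fun t => t ++ [',']) := by
  unfold pvFixedA
  simp only [List.append_assoc]
  simp only [pvFoldGen, PySem.List.foldl_append_eq_flatMap, List.nil_append]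
  rw [← pvCanon_eq, List.filter_flatMap, List.flatMap_assoc]
  congr 1
  funext q
  rw [List.filter_map, List.flatMap_map]
  rw [List.filter_congr (q := fun pre => pvCond s (pre ++ q))
    (fun pre _ => by simp [pvCond, List.append_assoc])]
  congr 1
  funext pre
  simp [List.append_assoc]

theorem pv_main (s : List Char) :
    (pvFixedA s).dropLast
      = PySem.Chars.join [','] ((PySem.List.sorted (pvKeys0B s) (fun k => k)).map pvTok) := by
  have hmem : ∀ k : Int, k ∈ pvKeys0B s ↔
      ∃ tok ∈ (pvSplit1 s).1 :: (pvSplit1 s).2,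
        pvRankB.contains tok = true ∧ pvRankB.getD tok 0 = k := by
    intro k
    unfold pvKeys0B
    rw [pvSplitOn_eq, pvSet_mem]
    simp [PySem.Set.empty]
  have hrange : ∀ k : Int, k ∈ pvKeys0B s → k ∈ pvKeys24 := by
    intro k hk
    obtain ⟨tok, -, h1, h2⟩ := (hmem k).mp hk
    obtain ⟨j, hj, rfl, h4⟩ := pvRank_mem_getD tok h1
    rwa [← h2, h4]
  have hiff : ∀ k ∈ pvKeys24,
      (k ∈ pvKeys0B s ↔ pvTok k ∈ (pvSplit1 s).1 :: (pvSplit1 s).2) := by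
    intro k hk
    rw [hmem]
    constructor
    · rintro ⟨tok, hmemf, h1, h2⟩
      obtain ⟨j, hj, rfl, h4⟩ := pvRank_mem_getD tok h1
      rw [h4] at h2; subst h2; exact hmemf
    · intro h
      exact ⟨pvTok k, h, (pvRank_getD k hk).1, (pvRank_getD k hk).2⟩
  have hnodup : (pvKeys0B s).Nodup := by
    unfold pvKeys0B
    exact pvSet_nodup _ _ (by simp [PySem.Set.empty])
  have hKS : PySem.List.sorted (pvKeys0B s) (fun k => k)
      = pvKeys24.filter (fun k => decide (k ∈ pvKeys0B s)) := by
    apply PySem.List.sorted_eq_of_perm_of_pairwise_lt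
    · apply List.perm_of_nodup_nodup_toFinset_eq
      · exact List.Nodup.filter _ pvKeys24_nodup
      · exact hnodup
      · ext k
        simp only [List.mem_toFinset, List.mem_filter, decide_eq_true_eq]
        exact ⟨fun h => h.2, fun h => ⟨hrange k h, h⟩⟩
    · exact List.Pairwise.filter _ pvKeys24_lt
  have hfilters : (pvKeys24.map pvTok).filter (pvCond s)
      = (pvKeys24.filter (fun k => decide (k ∈ pvKeys0B s))).map pvTok := by
    rw [List.filter_map]
    congr 1
    apply List.filter_congr
    intro k hk
    by_cases hb : pvCond s (pvTok k) = true
    · rw [Function.comp_apply, hb]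
      have hmemf := (pvIsIn_iff s (pvTok k) (pvTok_good k hk).1 (pvTok_good k hk).2).mp hb
      exact (decide_eq_true ((hiff k hk).mpr hmemf)).symm
    · rw [Function.comp_apply, eq_false_of_ne_true hb]
      have hnm : pvTok k ∉ (pvSplit1 s).1 :: (pvSplit1 s).2 := fun hmem =>
        hb ((pvIsIn_iff s (pvTok k) (pvTok_good k hk).1 (pvTok_good k hk).2).mpr hmem)
      have : k ∉ pvKeys0B s := fun hk0 => hnm ((hiff k hk).mp hk0)
      simp [this]
  rw [pvFixedA_eq, pvFlatMap_comma, hKS, hfilters]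

theorem pv_AB (s : List Char) : pvAMain s = pvBMain s := by
  unfold pvAMain pvBMain
  by_cases h : s = "unix".toList ∨ s = "unix,inet,inet6".toList
  · rw [if_pos h]
    rcases h with h | h <;> subst h <;> exact congrArg String.ofList (by decide)
  · rw [if_neg h]
    have hsl : PySem.Chars.slice (pvFixedA s) none (some (-1)) = (pvFixedA s).dropLast := by
      have := PySem.Str.slice_to_neg_one (String.ofList (pvFixedA s))
      simpa [PySem.Str.slice] using this
    rw [hsl]
    exact congrArg String.ofList (pv_main s)

-- ===== VERDICT (by name: the statement is the Claim_ definition above) =====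
theorem sort_protocol_spec : Claim_equal_sort_protocol := by
  intro p _
  show sort_protocol p = sort_protocol_alt p
  unfold sort_protocol sort_protocol_alt
  exact pv_AB _
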